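-- pv_equiv track=rewrite | github.com/KermitPurple96/custom-payloads | sql/charunicodeencode.py | unicode_encode
-- ===== SOURCE A (Python) =====
-- import string
--
-- def unicode_encode(payload):
--     retVal = payload
--
--     if payload:
--         retVal = ""
--         i = 0
--
--         while i < len(payload):
--             if payload[i] == '%' and (i < len(payload) - 2) and payload[i + 1:i + 2] in string.hexdigits and payload[i + 2:i + 3] in string.hexdigits:
--                 retVal += "%%u00%s" % payload[i + 1:i + 3]
--                 i += 3
--             else:
--                 retVal += '%%u%.4X' % ord(payload[i])
--                 i += 1
--
--     return retVal
-- ===== SOURCE B (Python) =====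
-- import re
--
-- _TOKEN = re.compile(r'%[0-9a-fA-F]{2}|.', re.DOTALL)
--
-- def _repl(m):
--     tok = m.group(0)
--     if len(tok) == 3:
--         return '%u00' + tok[1:3]
--     return '%%u%.4X' % ord(tok)
--
-- def unicode_encode(payload):
--     if not payload:
--         return payload
--     return _TOKEN.sub(_repl, payload)
-- ===== Notes on version B (the rewrite author's own statement) =====
-- stated objective: idiomatic
-- what changed: Replaced the manual index-stepping while-loop that builds the result with repeated string += by a single regex substitution (token pattern '%[0-9a-fA-F]{2}|.' with a replacement callback in re.sub).
import Mathlib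
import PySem

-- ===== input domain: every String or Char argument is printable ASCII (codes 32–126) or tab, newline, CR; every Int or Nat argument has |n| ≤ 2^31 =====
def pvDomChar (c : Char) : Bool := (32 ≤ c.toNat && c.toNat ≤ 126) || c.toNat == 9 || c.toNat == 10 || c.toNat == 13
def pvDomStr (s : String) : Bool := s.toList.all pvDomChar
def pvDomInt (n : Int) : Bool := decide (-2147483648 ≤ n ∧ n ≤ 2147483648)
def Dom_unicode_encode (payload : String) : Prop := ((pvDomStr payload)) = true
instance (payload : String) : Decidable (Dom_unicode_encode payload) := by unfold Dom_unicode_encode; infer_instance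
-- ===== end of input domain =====

-- B replaces A's manual index-stepping while-loop with regex-style tokenization (in Python, one
-- re.sub; here, structural recursion on the character list); same return value, proved on Dom.

-- shared helper: '%.4X' of a code point (4 uppercase hex digits; codes on Dom are ≤ 126)
def ue_hexDig (n : Nat) : Char := "0123456789ABCDEF".toList.getD n ' '
def ue_hex4 (n : Nat) : String :=
  String.ofList [ue_hexDig (n / 4096 % 16), ue_hexDig (n / 256 % 16), ue_hexDig (n / 16 % 16), ue_hexDig (n % 16)]
-- ===== PORT A =====
-- string.hexdigits
def ue_hexdigits : List Char :=
  ['0','1','2','3','4','5','6','7','8','9','a','b','c','d','e','f','A','B','C','D','E','F']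
-- Python's substring test `sub in string.hexdigits` for the slices A builds (length 0 or 1:
-- '' is a substring of everything; a 1-char string is a substring iff its char occurs)
def ue_inHexdigits (sub : List Char) : Bool :=
  sub == [] || (sub.length == 1 && ue_hexdigits.contains (sub.getD 0 ' '))
-- the while-loop: i steps by 3 past a recognised %XX escape, else by 1
def ue_loopA (cs : List Char) (i : Nat) (retVal : String) : String :=
  if h : i < cs.length then
    if (cs.getD i ' ' == '%') && decide (i < cs.length - 2)
        && ue_inHexdigits ((cs.drop (i + 1)).take 1)
        && ue_inHexdigits ((cs.drop (i + 2)).take 1) then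
      ue_loopA cs (i + 3) (retVal ++ "%u00" ++ String.ofList ((cs.drop (i + 1)).take 2))
    else
      ue_loopA cs (i + 1) (retVal ++ "%u" ++ ue_hex4 (cs.getD i ' ').toNat)
  else retVal
termination_by cs.length - i
def unicode_encode (payload : String) : String :=
  if payload == "" then payload else ue_loopA payload.toList 0 ""

-- ===== PORT B =====
-- the regex character class [0-9a-fA-F]
def ue_isHex (c : Char) : Bool :=
  ('0' ≤ c && c ≤ '9') || ('a' ≤ c && c ≤ 'f') || ('A' ≤ c && c ≤ 'F')
-- the tokenization '%[0-9a-fA-F]{2}|.' (DOTALL) with the substitution callback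
def ue_encB : List Char → String
  | [] => ""
  | '%' :: h1 :: h2 :: rest =>
      if ue_isHex h1 && ue_isHex h2 then
        "%u00" ++ String.ofList [h1, h2] ++ ue_encB rest
      else
        "%u" ++ ue_hex4 '%'.toNat ++ ue_encB (h1 :: h2 :: rest)
  | c :: rest => "%u" ++ ue_hex4 c.toNat ++ ue_encB rest


def unicode_encode_alt (payload : String) : String :=
  if payload == "" then payload else ue_encB payload.toList

-- ===== PRECONDITION & SPEC =====
def Spec_unicode_encode (payload : String) (out : String) : Prop := out = unicode_encode_alt payload
instance (payload : String) (out : String) : Decidable (Spec_unicode_encode payload out) := by unfold Spec_unicode_encode; infer_instance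

-- ===== CLAIM (what is proved, stated in full; the proofs are below) =====
def Claim_equal_unicode_encode : Prop := ∀ (payload : String), Dom_unicode_encode payload → Spec_unicode_encode payload (unicode_encode payload)

-- ===== LEMMAS AND PROOFS =====

theorem ue_char_eq_iff_toNat (c d : Char) : c = d ↔ c.toNat = d.toNat :=
  ⟨fun h => h ▸ rfl, fun h => Char.ext (UInt32.toNat_inj.mp h)⟩

theorem ue_char_le_iff_toNat (c d : Char) : c ≤ d ↔ c.toNat ≤ d.toNat := by
  rw [Char.le_def]; exact UInt32.le_iff_toNat_le

theorem ue_hex_equiv (c : Char) : c ∈ ue_hexdigits ↔ ue_isHex c = true := by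
  simp only [ue_hexdigits, ue_isHex, List.mem_cons, List.not_mem_nil, or_false,
    Bool.or_eq_true, Bool.and_eq_true, decide_eq_true_eq,
    ue_char_eq_iff_toNat, ue_char_le_iff_toNat, show ('0'.toNat = 48) from rfl, show ('1'.toNat = 49) from rfl, show ('2'.toNat = 50) from rfl, show ('3'.toNat = 51) from rfl, show ('4'.toNat = 52) from rfl, show ('5'.toNat = 53) from rfl, show ('6'.toNat = 54) from rfl, show ('7'.toNat = 55) from rfl, show ('8'.toNat = 56) from rfl, show ('9'.toNat = 57) from rfl, show ('a'.toNat = 97) from rfl, show ('b'.toNat = 98) from rfl, show ('c'.toNat = 99) from rfl, show ('d'.toNat = 100) from rfl, show ('e'.toNat = 101) from rfl, show ('f'.toNat = 102) from rfl, show ('A'.toNat = 65) from rfl, show ('B'.toNat = 66) from rfl, show ('C'.toNat = 67) from rfl, show ('D'.toNat = 68) from rfl, show ('E'.toNat = 69) from rfl, show ('F'.toNat = 70) from rfl]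
  omega

theorem ue_encB_not_pct (c : Char) (rest : List Char) (hc : c ≠ '%') :
    ue_encB (c :: rest) = "%u" ++ ue_hex4 c.toNat ++ ue_encB rest := by
  rw [ue_encB.eq_def]
  split
  · rename_i x heq; simp at heq
  · rename_i x h1 h2 r heq
    exact absurd (List.cons.inj heq).1 hc
  · rename_i x1 c' r' hno heq
    obtain ⟨e1, e2⟩ := List.cons.inj heq
    rw [e1, e2]

theorem ue_encB_short (c : Char) (rest : List Char) (h : rest.length <= 1) :
    ue_encB (c :: rest) = "%u" ++ ue_hex4 c.toNat ++ ue_encB rest := by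
  match rest, h with
  | [], _ => simp [ue_encB]
  | [a], _ => simp [ue_encB]

theorem ue_encB_pct_hex (h1 h2 : Char) (rest : List Char) (hh : (ue_isHex h1 && ue_isHex h2) = true) :
    ue_encB ('%' :: h1 :: h2 :: rest) = "%u00" ++ String.ofList [h1, h2] ++ ue_encB rest := by
  simp only [ue_encB]; rw [if_pos hh]

theorem ue_encB_pct_nohex (h1 h2 : Char) (rest : List Char) (hh : ¬(ue_isHex h1 && ue_isHex h2) = true) :
    ue_encB ('%' :: h1 :: h2 :: rest) = "%u" ++ ue_hex4 '%'.toNat ++ ue_encB (h1 :: h2 :: rest) := by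
  simp only [ue_encB]; rw [if_neg hh]

theorem ue_loopA_eq (cs : List Char) (i : Nat) (acc : String) :
    ue_loopA cs i acc = acc ++ ue_encB (cs.drop i) := by
  fun_induction ue_loopA cs i acc with
  | case1 i acc hlt hcond ih =>
    rw [ih]
    simp only [Bool.and_eq_true, beq_iff_eq, decide_eq_true_eq] at hcond
    obtain ⟨⟨⟨hpc, hlt2⟩, hx1⟩, hx2⟩ := hcond
    have hlen : i + 2 < cs.length := by omega
    have d0 : cs.drop i = cs[i] :: cs.drop (i + 1) := List.drop_eq_getElem_cons hlt
    have d1 : cs.drop (i + 1) = cs[i + 1] :: cs.drop (i + 2) := List.drop_eq_getElem_cons (by omega)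
    have d2 : cs.drop (i + 2) = cs[i + 2] :: cs.drop (i + 3) := List.drop_eq_getElem_cons hlen
    rw [List.getD_eq_getElem cs ' ' hlt] at hpc
    have hx1' : ue_isHex cs[i + 1] = true := by
      have h := hx1
      simp only [d1, List.take_succ_cons, List.take_zero] at h
      simpa [ue_inHexdigits, ue_hex_equiv] using h
    have hx2' : ue_isHex cs[i + 2] = true := by
      have h := hx2
      simp only [d2, List.take_succ_cons, List.take_zero] at h
      simpa [ue_inHexdigits, ue_hex_equiv] using h
    rw [d0, hpc, d1, d2, ue_encB_pct_hex _ _ _ (by rw [hx1', hx2']; rfl)]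
    simp only [List.take_succ_cons, List.take_zero, String.append_assoc]
  | case2 i acc hlt hcond ih =>
    rw [ih]
    have d0 : cs.drop i = cs[i] :: cs.drop (i + 1) := List.drop_eq_getElem_cons hlt
    rw [List.getD_eq_getElem cs ' ' hlt, d0]
    by_cases hpc : cs[i] = '%'
    · by_cases hlen : i + 2 < cs.length
      · have d1 : cs.drop (i + 1) = cs[i + 1] :: cs.drop (i + 2) := List.drop_eq_getElem_cons (by omega)
        have d2 : cs.drop (i + 2) = cs[i + 2] :: cs.drop (i + 3) := List.drop_eq_getElem_cons hlen
        have hnh : ¬(ue_isHex cs[i + 1] && ue_isHex cs[i + 2]) = true := by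
          intro hx
          rw [Bool.and_eq_true] at hx
          apply hcond
          simp only [Bool.and_eq_true, beq_iff_eq, decide_eq_true_eq]
          refine ⟨⟨⟨by rw [List.getD_eq_getElem cs ' ' hlt]; exact hpc, by omega⟩, ?_⟩, ?_⟩
          · simp only [d1, List.take_succ_cons, List.take_zero]
            simp [ue_inHexdigits, ue_hex_equiv, hx.1]
          · simp only [d2, List.take_succ_cons, List.take_zero]
            simp [ue_inHexdigits, ue_hex_equiv, hx.2]
        rw [hpc, d1, d2, ue_encB_pct_nohex _ _ _ hnh]
        simp only [String.append_assoc]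
      · have hshort : (cs.drop (i + 1)).length <= 1 := by simp [List.length_drop]; omega
        rw [ue_encB_short _ _ hshort]
        simp only [String.append_assoc, hpc]
    · rw [ue_encB_not_pct _ _ hpc]
      simp only [String.append_assoc]
  | case3 i acc h =>
    simp [List.drop_of_length_le (Nat.le_of_not_lt h), ue_encB]

-- ===== VERDICT (by name: the statement is the Claim_ definition above) =====
theorem unicode_encode_spec : Claim_equal_unicode_encode := by
  intro payload _
  unfold Spec_unicode_encode unicode_encode unicode_encode_alt
  split
  · rfl
  · simpa using ue_loopA_eq payload.toList 0 ""
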